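-- pv_equiv track=rewrite | github.com/Callerstudios/Test | wood_sort.py | make
-- ===== SOURCE A (Python) =====
-- def make(woods):
--     # Sort the woods by length in descending order
--     woods.sort(reverse=True)
--
--     # Initialize the result (list of planks)
--     planks = []
--
--     # Iterate over the sorted woods
--     while woods:
--         # Always take the longest wood
--         plank = [woods.pop(0)]
--
--         # Check for a smaller wood to pair with
--         for i in range(len(woods)):
--             if len(plank) == 1 and woods[i] < plank[0]:  # Pair only if the wood is shorter
--                 plank.append(woods.pop(i))
--                 break
--
--         # Add the plank to the result
--         planks.append(plank)
--
--     return planks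
-- ===== SOURCE B (Python) =====
-- def make(woods):
--     # Return-value equivalence only: A empties the input list while B just sorts it in place.
--     woods.sort(reverse=True)
--
--     # Collapse the sorted list into (value, count) groups, largest value on top of the stack.
--     groups = []
--     for w in reversed(woods):
--         if groups and groups[-1][0] == w:
--             groups[-1] = (w, groups[-1][1] + 1)
--         else:
--             groups.append((w, 1))
--
--     planks = []
--     while groups:
--         v, c = groups.pop()
--         if not groups:
--             planks.extend([v] for _ in range(c))
--         else:
--             v2, c2 = groups.pop()
--             k = c if c < c2 else c2
--             planks.extend([v, v2] for _ in range(k))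
--             if c > k:
--                 groups.append((v, c - k))
--             elif c2 > k:
--                 groups.append((v2, c2 - k))
--     return planks
-- ===== Notes on version B (the rewrite author's own statement) =====
-- stated objective: faster
-- what changed: Replaces A's quadratic while-loop that pops the head and linearly scans/pops a strictly smaller partner by: sort once, collapse into (value,count) groups, and pair adjacent groups via a stack, emitting min(count) pairs per group pair.
import Mathlib
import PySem

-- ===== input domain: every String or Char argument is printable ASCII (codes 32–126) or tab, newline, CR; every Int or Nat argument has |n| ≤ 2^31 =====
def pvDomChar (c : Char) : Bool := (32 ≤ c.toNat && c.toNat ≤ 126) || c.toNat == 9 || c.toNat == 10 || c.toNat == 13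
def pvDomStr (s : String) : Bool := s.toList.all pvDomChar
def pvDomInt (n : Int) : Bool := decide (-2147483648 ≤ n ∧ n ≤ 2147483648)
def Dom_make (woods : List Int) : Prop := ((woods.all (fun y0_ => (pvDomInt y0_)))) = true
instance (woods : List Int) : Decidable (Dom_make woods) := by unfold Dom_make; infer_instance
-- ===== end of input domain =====

-- B replaces A's quadratic pop-and-scan pairing by sort + value/count groups consumed with a
-- stack (O(n log n)); return-value equivalence only: A empties the input list, B only sorts it.

-- ===== PORT A =====
-- the inner 'for i in range(len(woods)): if woods[i] < plank[0]: plank.append(woods.pop(i)); break'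
-- returns the finished plank and the remaining list
def findPair (w : Int) : List Int → List Int × List Int
  | [] => ([w], [])
  | x :: xs =>
      if x < w then ([w, x], xs)
      else
        let pr := findPair w xs
        (pr.1, x :: pr.2)

theorem findPair_snd_length (w : Int) (xs : List Int) :
    (findPair w xs).2.length ≤ xs.length := by
  induction xs with
  | nil => simp [findPair]
  | cons x xs ih =>
      simp only [findPair]
      split
      · simp
      · simpa using Nat.succ_le_succ ih

-- 'while woods: plank = [woods.pop(0)]; …; planks.append(plank)'
def makeLoop : List Int → List (List Int)
  | [] => []
  | w :: rest =>
      let pr := findPair w rest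
      pr.1 :: makeLoop pr.2
termination_by l => l.length
decreasing_by
  simpa using Nat.lt_succ_of_le (findPair_snd_length w rest)

def make (woods : List Int) : List (List Int) :=
  makeLoop (PySem.List.sorted woods (fun x => x) true)

-- ===== PORT B =====
-- 'for w in reversed(woods): …' building the (value, count) group stack, top (= Lean head) largest
def buildGroups (ws : List Int) : List (Int × Int) :=
  ws.foldr (fun w gs =>
    match gs with
    | (v, c) :: rest => if v == w then (v, c + 1) :: rest else (w, 1) :: (v, c) :: rest
    | [] => [(w, 1)]) []

-- 'while groups: v, c = groups.pop(); …'
def pairGroups : List (Int × Int) → List (List Int)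
  | [] => []
  | [(v, c)] => List.replicate c.toNat [v]
  | (v, c) :: (v2, c2) :: rest =>
      let k := min c c2
      List.replicate k.toNat [v, v2] ++
        (if k < c then pairGroups ((v, c - k) :: rest)
         else if k < c2 then pairGroups ((v2, c2 - k) :: rest)
         else pairGroups rest)
termination_by gs => gs.length
decreasing_by all_goals simp

def make_alt (woods : List Int) : List (List Int) :=
  pairGroups (buildGroups (PySem.List.sorted woods (fun x => x) true))

-- ===== PRECONDITION & SPEC =====
def Spec_make (woods : List Int) (out : List (List Int)) : Prop := out = make_alt woods
instance (woods : List Int) (out : List (List Int)) : Decidable (Spec_make woods out) := by unfold Spec_make; infer_instance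

-- ===== CLAIM (what is proved, stated in full; the proofs are below) =====
def Claim_equal_make : Prop := ∀ (woods : List Int), Dom_make woods → Spec_make woods (make woods)

-- ===== LEMMAS AND PROOFS =====

-- the multiset a group stack denotes
def ungroup (gs : List (Int × Int)) : List Int :=
  gs.flatMap (fun p => List.replicate p.2.toNat p.1)

theorem ungroup_nil : ungroup [] = [] := rfl

theorem ungroup_cons (v c : Int) (gs : List (Int × Int)) :
    ungroup ((v, c) :: gs) = List.replicate c.toNat v ++ ungroup gs := by
  simp [ungroup]

-- findPair finds nothing among copies of w itself
theorem findPair_replicate_self (w : Int) (m : Nat) :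
    findPair w (List.replicate m w) = ([w], List.replicate m w) := by
  induction m with
  | zero => simp [findPair]
  | succ m ih => simp [List.replicate_succ, findPair, ih]

-- findPair skips the copies of w and takes the first strictly smaller element
theorem findPair_replicate_lt (w v2 : Int) (h : v2 < w) (m : Nat) (t : List Int) :
    findPair w (List.replicate m w ++ v2 :: t) = ([w, v2], List.replicate m w ++ t) := by
  induction m with
  | zero => simp [findPair, h]
  | succ m ih => simp [List.replicate_succ, findPair, ih]

-- A's loop on an all-equal list yields singletons
theorem makeLoop_replicate (v : Int) (n : Nat) :
    makeLoop (List.replicate n v) = List.replicate n [v] := by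
  induction n with
  | zero => simp [makeLoop]
  | succ n ih => simp [List.replicate_succ, makeLoop, findPair_replicate_self, ih]

-- one pairing step of B's loop, counts still positive
theorem pairGroups_step (v c v2 c2 : Int) (rest : List (Int × Int))
    (hc : 1 ≤ c) (hc2 : 1 ≤ c2) :
    pairGroups ((v, c) :: (v2, c2) :: rest)
      = [v, v2] :: pairGroups ((v, c - 1) :: (v2, c2 - 1) :: rest) := by
  conv_lhs => rw [pairGroups]
  conv_rhs => rw [pairGroups]
  rcases lt_trichotomy c c2 with h | h | h
  · have hk : min c c2 = c := min_eq_left h.le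
    have hk' : min (c - 1) (c2 - 1) = c - 1 := min_eq_left (by omega)
    rw [hk, hk', if_neg (lt_irrefl c), if_pos (by omega : c < c2),
      if_neg (lt_irrefl (c - 1)), if_pos (by omega : c - 1 < c2 - 1)]
    have e1 : c2 - 1 - (c - 1) = c2 - c := by ring
    have e2 : c.toNat = (c - 1).toNat + 1 := by omega
    rw [e1, e2, List.replicate_succ, List.cons_append]
  · subst h
    rw [min_self, min_self, if_neg (lt_irrefl c), if_neg (lt_irrefl c),
      if_neg (lt_irrefl (c - 1)), if_neg (lt_irrefl (c - 1))]
    have e2 : c.toNat = (c - 1).toNat + 1 := by omega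
    rw [e2, List.replicate_succ, List.cons_append]
  · have hk : min c c2 = c2 := min_eq_right h.le
    have hk' : min (c - 1) (c2 - 1) = c2 - 1 := min_eq_right (by omega)
    rw [hk, hk', if_pos (by omega : c2 < c), if_pos (by omega : c2 - 1 < c - 1)]
    have e1 : c - 1 - (c2 - 1) = c - c2 := by ring
    have e2 : c2.toNat = (c2 - 1).toNat + 1 := by omega
    rw [e1, e2, List.replicate_succ, List.cons_append]

-- strictly descending values, nonnegative counts
def OkGroups (gs : List (Int × Int)) : Prop :=
  gs.Pairwise (fun a b => b.1 < a.1) ∧ ∀ p ∈ gs, 0 ≤ p.2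

-- empty-count groups vanish from pairGroups in front position
theorem pairGroups_zero_head (v : Int) (v2 c2 : Int) (rest : List (Int × Int))
    (hc2 : 0 ≤ c2) :
    pairGroups ((v, 0) :: (v2, c2) :: rest)
      = if 0 < c2 then pairGroups ((v2, c2) :: rest) else pairGroups rest := by
  have hk : min (0 : Int) c2 = 0 := min_eq_left hc2
  rw [pairGroups]
  by_cases h2 : (0 : Int) < c2
  · rw [hk, if_neg (lt_irrefl 0), if_pos h2, if_pos h2]
    simp
  · have : c2 = 0 := by omega
    subst this
    rw [hk, if_neg (lt_irrefl 0), if_neg (lt_irrefl 0), if_neg h2]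
    simp

-- main bridge: A's loop on the flattened stack equals B's loop on the stack
theorem makeLoop_ungroup (n : Nat) :
    ∀ gs : List (Int × Int), gs.length + (ungroup gs).length ≤ n → OkGroups gs →
      makeLoop (ungroup gs) = pairGroups gs := by
  induction n with
  | zero =>
      intro gs h _
      have : gs = [] := by
        cases gs with
        | nil => rfl
        | cons a l => simp at h
      subst this
      simp [ungroup, makeLoop, pairGroups]
  | succ n ih =>
      intro gs hlen hok
      match gs with
      | [] => simp [ungroup, makeLoop, pairGroups]
      | [(v, c)] =>
          rw [ungroup_cons, ungroup_nil, List.append_nil, makeLoop_replicate]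
          rw [pairGroups]
      | (v, c) :: (v2, c2) :: rest =>
          obtain ⟨hpw, hcnt⟩ := hok
          obtain ⟨h1, hpw2⟩ := List.pairwise_cons.1 hpw
          obtain ⟨h2, hpw3⟩ := List.pairwise_cons.1 hpw2
          have hv2v : v2 < v := h1 (v2, c2) (by simp)
          have hc0 : (0 : Int) ≤ c := hcnt (v, c) (by simp)
          have hc20 : (0 : Int) ≤ c2 := hcnt (v2, c2) (by simp)
          by_cases hc : 1 ≤ c
          · by_cases hc2 : 1 ≤ c2
            · -- both positive: one pairing step on each side
              have hdec : ungroup ((v, c) :: (v2, c2) :: rest)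
                  = v :: (List.replicate (c - 1).toNat v ++
                      (v2 :: (List.replicate (c2 - 1).toNat v2 ++ ungroup rest))) := by
                rw [ungroup_cons, ungroup_cons]
                have e1 : c.toNat = (c - 1).toNat + 1 := by omega
                have e2 : c2.toNat = (c2 - 1).toNat + 1 := by omega
                rw [e1, e2, List.replicate_succ, List.replicate_succ]
                simp
              rw [hdec, makeLoop]
              have hfp := findPair_replicate_lt v v2 hv2v (c - 1).toNat
                (List.replicate (c2 - 1).toNat v2 ++ ungroup rest)
              simp only [hfp]
              have hrem : List.replicate (c - 1).toNat v ++
                  (List.replicate (c2 - 1).toNat v2 ++ ungroup rest)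
                    = ungroup ((v, c - 1) :: (v2, c2 - 1) :: rest) := by
                rw [ungroup_cons, ungroup_cons]
              rw [hrem, pairGroups_step v c v2 c2 rest hc hc2]
              congr 1
              apply ih
              · have hL : (ungroup ((v, c - 1) :: (v2, c2 - 1) :: rest)).length + 2
                    = (ungroup ((v, c) :: (v2, c2) :: rest)).length := by
                  rw [ungroup_cons, ungroup_cons, ungroup_cons, ungroup_cons]
                  simp only [List.length_append, List.length_replicate]
                  omega
                simp only [List.length_cons] at hlen ⊢
                omega
              · refine ⟨List.pairwise_cons.2 ⟨?_, List.pairwise_cons.2 ⟨h2, hpw3⟩⟩, ?_⟩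
                · intro b hb
                  simp only [List.mem_cons] at hb
                  rcases hb with hb | hb
                  · subst hb; exact hv2v
                  · exact h1 b (by simp [hb])
                · intro p hp
                  simp only [List.mem_cons] at hp
                  rcases hp with h | h | h
                  · subst h; simpa using by omega
                  · subst h; simpa using by omega
                  · exact hcnt p (by simp [h])
            · -- c2 = 0 : drop the empty partner group
              have hc2z : c2 = 0 := by omega
              subst hc2z
              have hug : ungroup ((v, c) :: (v2, 0) :: rest) = ungroup ((v, c) :: rest) := by
                rw [ungroup_cons, ungroup_cons, ungroup_cons]
                simp
              have hpg : pairGroups ((v, c) :: (v2, 0) :: rest) = pairGroups ((v, c) :: rest) := by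
                have hk : min c (0 : Int) = 0 := min_eq_right hc0
                rw [pairGroups, hk, if_pos (by omega : (0 : Int) < c)]
                simp
              rw [hug, hpg]
              apply ih
              · rw [hug] at hlen
                simp only [List.length_cons] at hlen ⊢
                omega
              · refine ⟨List.pairwise_cons.2 ⟨fun b hb => h1 b (by simp [hb]), hpw3⟩, ?_⟩
                intro p hp
                simp only [List.mem_cons] at hp
                rcases hp with h | h
                · subst h; simpa using hc0
                · exact hcnt p (by simp [h])
          · -- c = 0 : drop the empty current group
            have hcz : c = 0 := by omega
            subst hcz
            have hug : ungroup ((v, 0) :: (v2, c2) :: rest) = ungroup ((v2, c2) :: rest) := by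
              rw [ungroup_cons]; simp
            rw [hug, pairGroups_zero_head v v2 c2 rest hc20]
            by_cases h2p : (0 : Int) < c2
            · rw [if_pos h2p]
              apply ih
              · rw [hug] at hlen
                simp only [List.length_cons] at hlen ⊢
                omega
              · exact ⟨hpw2, fun p hp => hcnt p (by simp [hp])⟩
            · have : c2 = 0 := by omega
              subst this
              rw [if_neg h2p]
              have hug2 : ungroup ((v2, (0 : Int)) :: rest) = ungroup rest := by
                rw [ungroup_cons]; simp
              rw [hug2]
              apply ih
              · rw [hug, hug2] at hlen
                simp only [List.length_cons] at hlen ⊢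
                omega
              · exact ⟨hpw3, fun p hp => hcnt p (by simp [hp])⟩

-- buildGroups of a descending list: strictly descending positive groups flattening back to it
theorem buildGroups_spec (l : List Int) (h : l.Pairwise (fun a b => b ≤ a)) :
    (buildGroups l).Pairwise (fun a b => b.1 < a.1) ∧ (∀ p ∈ buildGroups l, 1 ≤ p.2) ∧
      ungroup (buildGroups l) = l := by
  induction l with
  | nil => simp [buildGroups, ungroup]
  | cons v rest ih =>
      obtain ⟨hle, hpw⟩ := List.pairwise_cons.1 h
      obtain ⟨ihpw, ihpos, ihug⟩ := ih hpw
      have hstep : buildGroups (v :: rest)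
          = match buildGroups rest with
            | (v', c') :: rest' => if v' == v then (v', c' + 1) :: rest' else (v, 1) :: (v', c') :: rest'
            | [] => [(v, 1)] := rfl
      match hbg : buildGroups rest with
      | [] =>
          have hstep2 : buildGroups (v :: rest) = [(v, 1)] := by rw [hstep, hbg]
          rw [hstep2]
          have : rest = [] := by rw [← ihug, hbg]; rfl
          subst this
          refine ⟨by simp, by simp, ?_⟩
          simp [ungroup]
      | (v', c') :: rest' =>
          rw [hbg] at ihpw ihpos ihug
          have hc' : 1 ≤ c' := ihpos (v', c') (by simp)
          have hmem : v' ∈ rest := by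
            rw [← ihug, ungroup_cons]
            have : c'.toNat = (c'.toNat - 1) + 1 := by omega
            rw [this, List.replicate_succ]
            simp
          have hv'v : v' ≤ v := hle _ hmem
          have hstep2 : buildGroups (v :: rest)
              = if v' == v then (v', c' + 1) :: rest' else (v, 1) :: (v', c') :: rest' := by
            rw [hstep, hbg]
          rw [hstep2]
          by_cases heq : v' = v
          · subst heq
            rw [if_pos (by simp)]
            obtain ⟨h1', hpw'⟩ := List.pairwise_cons.1 ihpw
            refine ⟨List.pairwise_cons.2 ⟨h1', hpw'⟩, ?_, ?_⟩
            · intro p hp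
              simp only [List.mem_cons] at hp
              rcases hp with h | h
              · subst h; simpa using by omega
              · exact ihpos p (by simp [h])
            · rw [ungroup_cons]
              rw [ungroup_cons] at ihug
              have : (c' + 1).toNat = c'.toNat + 1 := by omega
              rw [this, List.replicate_succ]
              simpa using ihug
          · have hlt : v' < v := lt_of_le_of_ne hv'v heq
            rw [if_neg (by simp [heq])]
            refine ⟨?_, ?_, ?_⟩
            · refine List.pairwise_cons.2 ⟨?_, ihpw⟩
              intro b hb
              simp only [List.mem_cons] at hb
              rcases hb with hb | hb
              · subst hb; exact hlt
              · calc b.1 < v' := (List.pairwise_cons.1 ihpw).1 b hb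
                  _ < v := hlt
            · intro p hp
              simp only [List.mem_cons] at hp
              rcases hp with h | h
              · subst h; simp
              · exact ihpos p (by simpa using h)
            · rw [ungroup_cons]
              simp only [Int.toNat_one, List.replicate_one]
              rw [List.singleton_append, ihug]

theorem make_spec : Claim_equal_make := by
  unfold Claim_equal_make Spec_make
  intro woods _
  unfold make make_alt
  set s := PySem.List.sorted woods (fun x => x) true with hs
  have hpw : s.Pairwise (fun a b => b ≤ a) := by
    simpa using PySem.List.sorted_pairwise_rev woods (fun x => x)
  obtain ⟨h1, h2, h3⟩ := buildGroups_spec s hpw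
  have := makeLoop_ungroup ((buildGroups s).length + (ungroup (buildGroups s)).length)
    (buildGroups s) (le_refl _) ⟨h1, fun p hp => le_trans (by norm_num) (h2 p hp)⟩
  rw [h3] at this
  exact this
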